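-- pv_equiv track=rewrite | github.com/pceuropa/number-integer-to-number-string | app/numbersinword.py | cutOnGroup
-- ===== SOURCE A (Python) =====
-- def cutOnGroup(list_number):
--     """ Dzieli liste jednowymiarową na kilkuwymiarową. Ma to ułatwić nazywanie grup
--     :list_number: list
--     :return list"""
--
--     list_number = list_number[::-1]
--     i = 0
--     a = []
--     while len(list_number[i:i + 3]) != 0:
--         b = list_number[i:i + 3]
--         a.append(b[::-1])
--         i += 3
--     return a[::-1]
-- ===== SOURCE B (Python) =====
-- def cutOnGroup(list_number):
--     """Group a list into chunks of three, counted from the right, in one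
--     left-to-right pass: a short leading group of len(list_number) % 3
--     elements (if any), then full groups of three."""
--     n = len(list_number)
--     r = n % 3
--     result = []
--     if r != 0:
--         result.append(list_number[:r])
--     for i in range(r, n, 3):
--         result.append(list_number[i:i + 3])
--     return result
-- ===== Notes on version B (the rewrite author's own statement) =====
-- stated objective: simpler
-- what changed: Replaces the reverse/while-slice/reverse-each-chunk/reverse-result scheme with a single left-to-right pass that computes the short leading group boundary as n % 3 and then slices full groups of three forward, eliminating all three reversals.
import Mathlib
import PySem

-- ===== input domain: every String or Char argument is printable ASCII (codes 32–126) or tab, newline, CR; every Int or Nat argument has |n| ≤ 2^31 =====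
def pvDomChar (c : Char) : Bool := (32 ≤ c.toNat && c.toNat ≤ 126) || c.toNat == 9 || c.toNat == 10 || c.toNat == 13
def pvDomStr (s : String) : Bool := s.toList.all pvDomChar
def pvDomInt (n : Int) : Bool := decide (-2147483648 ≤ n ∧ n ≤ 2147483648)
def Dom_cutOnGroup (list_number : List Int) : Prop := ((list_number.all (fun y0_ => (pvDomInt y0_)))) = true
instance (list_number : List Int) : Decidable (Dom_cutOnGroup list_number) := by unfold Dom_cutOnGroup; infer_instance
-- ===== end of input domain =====

-- B replaces A's reverse/group/re-reverse scheme with one forward pass using the n % 3 boundary (objective: simpler).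

-- ===== PORT A =====
-- the while loop of A: appends list_number[i:i+3][::-1] while the slice is nonempty
-- ([::-1] is List.reverse: PySem.List.slice?_none_none_neg_one); the fuel argument
-- only makes the loop total (l.length + 1 iterations always suffice)
def cutOnGroupLoopA (l : List Int) : Nat → Nat → List (List Int) → List (List Int)
  | 0, _, a => a
  | fuel + 1, i, a =>
    if (PySem.List.slice l (some (i : Int)) (some ((i : Int) + 3))).length ≠ 0 then
      cutOnGroupLoopA l fuel (i + 3)
        (a ++ [(PySem.List.slice l (some (i : Int)) (some ((i : Int) + 3))).reverse])
    else a

def cutOnGroup (list_number : List Int) : List (List Int) :=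
  -- list_number = list_number[::-1]; i = 0; a = []; while …; return a[::-1]
  (cutOnGroupLoopA list_number.reverse (list_number.length + 1) 0 []).reverse

-- ===== PORT B =====
def cutOnGroup_alt (list_number : List Int) : List (List Int) :=
  let n : Int := list_number.length
  let r : Int := PySem.Int.mod n 3
  let result : List (List Int) :=
    if r ≠ 0 then [PySem.List.slice list_number none (some r)] else []
  (PySem.List.pyRange r n 3).foldl
    (fun acc i => acc ++ [PySem.List.slice list_number (some i) (some (i + 3))]) result

-- ===== PRECONDITION & SPEC =====
def Spec_cutOnGroup (list_number : List Int) (out : List (List Int)) : Prop := out = cutOnGroup_alt list_number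
instance (list_number : List Int) (out : List (List Int)) : Decidable (Spec_cutOnGroup list_number out) := by unfold Spec_cutOnGroup; infer_instance

-- ===== CLAIM (what is proved, stated in full; the proofs are below) =====
def Claim_equal_cutOnGroup : Prop := ∀ (list_number : List Int), Dom_cutOnGroup list_number → Spec_cutOnGroup list_number (cutOnGroup list_number)

-- ===== LEMMAS AND PROOFS =====

-- common reference: peel the last (up to) three elements
def chunkBack (l : List Int) : List (List Int) :=
  if l.length = 0 then []
  else chunkBack (l.take (l.length - 3)) ++ [l.drop (l.length - 3)]
termination_by l.length
decreasing_by simp only [List.length_take]; omega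

-- structural form of A's loop body on the reversed list
def goA (m : List Int) : List (List Int) :=
  if m.length = 0 then [] else (m.take 3).reverse :: goA (m.drop 3)
termination_by m.length
decreasing_by simp only [List.length_drop]; omega

-- xs[i:i+3] with natural i
theorem pvSliceA (l : List Int) (i : Nat) :
    PySem.List.slice l (some (i : Int)) (some ((i : Int) + 3)) = (l.drop i).take 3 := by
  rw [PySem.List.slice_toNat l (by positivity) (by positivity)]
  have h1 : ((i : Int) + 3).toNat = i + 3 := by omega
  have h2 : ((i : Int)).toNat = i := by omega
  rw [h1, h2]
  congr 1
  omega

theorem loopA_eq (m : List Int) (fuel : Nat) :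
    ∀ (i : Nat) (acc : List (List Int)), m.length ≤ i + 3 * fuel →
      cutOnGroupLoopA m fuel i acc = acc ++ goA (m.drop i) := by
  induction fuel with
  | zero =>
    intro i acc hf
    have hd : m.drop i = [] := List.drop_eq_nil_of_le (by omega)
    rw [cutOnGroupLoopA, hd, goA]
    simp
  | succ fuel ih =>
    intro i acc hf
    rw [cutOnGroupLoopA, goA, pvSliceA]
    by_cases h : (m.drop i).length = 0
    · have h2 : ¬ ((m.drop i).take 3).length ≠ 0 := by
        simp only [List.length_take, List.length_drop] at h ⊢
        omega
      rw [if_neg h2, if_pos h, List.append_nil]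
    · have h2 : ((m.drop i).take 3).length ≠ 0 := by
        simp only [List.length_take, List.length_drop] at h ⊢
        omega
      rw [if_pos h2, if_neg h, ih (i + 3) _ (by omega)]
      have hdd : m.drop (i + 3) = (m.drop i).drop 3 := by
        rw [List.drop_drop]
      rw [hdd, List.append_assoc, List.singleton_append]

theorem goA_rev (l : List Int) : (goA l.reverse).reverse = chunkBack l := by
  rw [goA, chunkBack]
  by_cases h0 : l.length = 0
  · have hl : l.reverse.length = 0 := by simpa using h0
    rw [if_pos hl, if_pos h0, List.reverse_nil]
  · have hl : ¬ l.reverse.length = 0 := by simpa using h0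
    rw [if_neg hl, if_neg h0]
    have htake : (l.reverse.take 3).reverse = l.drop (l.length - 3) := by
      rw [List.take_reverse, List.reverse_reverse]
    have hdrop : l.reverse.drop 3 = (l.take (l.length - 3)).reverse := by
      by_cases h3 : 3 ≤ l.length
      · rw [List.reverse_take]
        congr 1
        omega
      · have e0 : l.length - 3 = 0 := by omega
        have hle : l.reverse.length ≤ 3 := by simp only [List.length_reverse]; omega
        rw [e0, List.take_zero, List.reverse_nil, List.drop_eq_nil_of_le hle]
    rw [List.reverse_cons, htake, hdrop, goA_rev (l.take (l.length - 3))]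
termination_by l.length
decreasing_by simp only [List.length_take]; omega

theorem A_eq_chunkBack (l : List Int) : cutOnGroup l = chunkBack l := by
  unfold cutOnGroup
  rw [loopA_eq l.reverse (l.length + 1) 0 [] (by simp only [List.length_reverse]; omega),
    List.drop_zero, List.nil_append, goA_rev]

-- closed Nat form of B
def closedB (l : List Int) : List (List Int) :=
  (if l.length % 3 ≠ 0 then [l.take (l.length % 3)] else []) ++
    (List.range (l.length / 3)).map (fun k => (l.drop (l.length % 3 + 3 * k)).take 3)

theorem foldl_app {a : Type} (f : Int → a) (xs : List Int) (init : List a) :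
    xs.foldl (fun acc i => acc ++ [f i]) init = init ++ xs.map f := by
  induction xs generalizing init with
  | nil => simp
  | cons x xs ih => simp [ih, List.append_assoc]

theorem B_eq_closed (l : List Int) : cutOnGroup_alt l = closedB l := by
  have hmod : PySem.Int.mod (l.length : Int) 3 = ((l.length % 3 : Nat) : Int) := by
    rw [PySem.Int.mod_eq_emod_of_pos (by norm_num)]
    push_cast
    rfl
  have hrange : PySem.List.pyRange ((l.length % 3 : Nat) : Int) (l.length : Int) 3
      = (List.range (l.length / 3)).map
          (fun (k : Nat) => ((l.length % 3 : Nat) : Int) + 3 * (k : Int)) := by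
    rw [PySem.List.pyRange_of_pos _ _ (by norm_num)]
    have hqv : (if ((l.length % 3 : Nat) : Int) < (l.length : Int)
        then (((l.length : Int) - ((l.length % 3 : Nat) : Int) + 3 - 1) / 3).toNat else 0)
        = l.length / 3 := by
      by_cases h : ((l.length % 3 : Nat) : Int) < (l.length : Int)
      · rw [if_pos h]
        omega
      · rw [if_neg h]
        omega
    rw [hqv]
  simp only [cutOnGroup_alt, closedB, hmod]
  rw [hrange, foldl_app (fun i => PySem.List.slice l (some i) (some (i + 3)))]
  congr 1
  · by_cases hm : l.length % 3 = 0
    · have hm' : ¬ ((l.length % 3 : Nat) : Int) ≠ 0 := by omega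
      rw [if_neg hm', if_neg (by omega : ¬ l.length % 3 ≠ 0)]
    · have hm' : ((l.length % 3 : Nat) : Int) ≠ 0 := by omega
      rw [if_pos hm', if_pos hm, PySem.List.slice_to _ (by omega)]
      all_goals congr 1
      all_goals omega
  · rw [List.map_map]
    apply List.map_congr_left
    intro k _
    simp only [Function.comp_apply]
    rw [PySem.List.slice_toNat l (by omega) (by omega)]
    have e1 : (((l.length % 3 : Nat) : Int) + 3 * (k : Int)).toNat = l.length % 3 + 3 * k := by
      omega
    have e2 : (((l.length % 3 : Nat) : Int) + 3 * (k : Int) + 3).toNat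
        = l.length % 3 + 3 * k + 3 := by
      omega
    rw [e1, e2]
    congr 1
    omega

theorem drop_of_take (l : List Int) (a j : Nat) (h : j + 3 ≤ a) :
    ((l.take a).drop j).take 3 = (l.drop j).take 3 := by
  rw [List.drop_take, List.take_take, min_eq_left (by omega)]

theorem closedB_eq_chunkBack (l : List Int) : closedB l = chunkBack l := by
  rw [chunkBack]
  by_cases h0 : l.length = 0
  · rw [if_pos h0]
    simp [closedB, h0]
  · rw [if_neg h0]
    by_cases h3 : l.length ≤ 3
    · have e0 : l.length - 3 = 0 := by omega
      have hnil : chunkBack ([] : List Int) = [] := by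
        rw [chunkBack]
        norm_num
      rw [e0, List.take_zero, List.drop_zero, hnil, List.nil_append]
      rcases (by omega : l.length = 1 ∨ l.length = 2 ∨ l.length = 3) with h | h | h
      · simp [closedB, h, List.take_of_length_le (show l.length ≤ 1 by omega)]
      · simp [closedB, h, List.take_of_length_le (show l.length ≤ 2 by omega)]
      · simp [closedB, h, List.range_succ,
          List.take_of_length_le (show l.length ≤ 3 by omega)]
    · rw [← closedB_eq_chunkBack (l.take (l.length - 3))]
      have hfl : (l.take (l.length - 3)).length = l.length - 3 := by
        simp only [List.length_take]
        omega
      unfold closedB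
      rw [hfl]
      have hm : (l.length - 3) % 3 = l.length % 3 := by omega
      have hq : l.length / 3 = (l.length - 3) / 3 + 1 := by omega
      have hS : (l.take (l.length - 3)).take (l.length % 3) = l.take (l.length % 3) := by
        rw [List.take_take, min_eq_left (by omega)]
      rw [hm, hq, List.range_succ, List.map_append, List.map_cons, List.map_nil, hS]
      have hlast : (l.drop (l.length % 3 + 3 * ((l.length - 3) / 3))).take 3
          = l.drop (l.length - 3) := by
        have e : l.length % 3 + 3 * ((l.length - 3) / 3) = l.length - 3 := by omega
        rw [e, List.take_of_length_le (by simp only [List.length_drop]; omega)]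
      have hmap : (List.range ((l.length - 3) / 3)).map
            (fun k => ((l.take (l.length - 3)).drop (l.length % 3 + 3 * k)).take 3)
          = (List.range ((l.length - 3) / 3)).map
            (fun k => (l.drop (l.length % 3 + 3 * k)).take 3) := by
        apply List.map_congr_left
        intro k hk
        have hk' : k < (l.length - 3) / 3 := List.mem_range.mp hk
        exact drop_of_take l (l.length - 3) (l.length % 3 + 3 * k) (by omega)
      rw [hlast, hmap, ← List.append_assoc]
termination_by l.length
decreasing_by simp only [List.length_take]; omega

-- ===== VERDICT (by name: the statement is the Claim_ definition above) =====
theorem cutOnGroup_spec : Claim_equal_cutOnGroup := by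
  intro l _
  unfold Spec_cutOnGroup
  rw [A_eq_chunkBack, B_eq_closed, closedB_eq_chunkBack]
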